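-- pv_equiv track=rewrite | github.com/tibbe78/Yatzy | yatzy.py | count_straight_score
-- ===== SOURCE A (Python) =====
-- from typing import List, Dict
--
-- def count_straight_score(dices: List[int], is_large: int):
--     dices.sort(reverse=False)
--     if is_large == 1:
--         prev_dice = 1
--     else:
--         prev_dice = 0
--     found = 0
--     for dice in dices:
--         if dice == prev_dice + 1:
--             found += 1
--             prev_dice = dice
--         else:
--             return 0
--     if is_large == 1:
--         return 20
--     else:
--         return 15
-- ===== SOURCE B (Python) =====
-- def count_straight_score(dices, is_large):
--     # Hash-set membership: no sort at all. A straight exists iff all the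
--     # len(dices) required pips (start..start+n-1, distinct) appear in the set of
--     # dice; since the set has at most n elements this forces an exact match.
--     # NOTE: unlike A, this does NOT sort `dices` in place (return value only).
--     start = 2 if is_large == 1 else 1
--     s = set(dices)
--     if all(start + i in s for i in range(len(dices))):
--         return 20 if is_large == 1 else 15
--     return 0
-- ===== Notes on version B (the rewrite author's own statement) =====
-- stated objective: alternative
-- what changed: Drops the sort entirely: builds a hash set of the dice once and checks that each of the n required pip values is a member, instead of A's sort followed by an element-by-element consecutive scan.
import Mathlib
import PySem

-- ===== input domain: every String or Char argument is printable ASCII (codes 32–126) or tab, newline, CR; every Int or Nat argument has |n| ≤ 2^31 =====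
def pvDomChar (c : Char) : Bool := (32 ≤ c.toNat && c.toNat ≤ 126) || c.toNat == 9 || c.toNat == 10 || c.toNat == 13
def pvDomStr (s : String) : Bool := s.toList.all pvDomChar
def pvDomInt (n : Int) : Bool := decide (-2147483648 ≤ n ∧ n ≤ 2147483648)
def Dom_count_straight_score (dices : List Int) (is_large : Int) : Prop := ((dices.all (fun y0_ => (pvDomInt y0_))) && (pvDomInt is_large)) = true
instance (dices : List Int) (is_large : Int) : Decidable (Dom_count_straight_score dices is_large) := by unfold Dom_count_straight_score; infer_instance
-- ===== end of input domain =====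

-- B replaces A's sort-then-consecutive-scan by a sortless hash-set membership check of the n
-- required pip values (objective: alternative). A sorts `dices` in place, B does not mutate it —
-- the equivalence proved is about the RETURN value only.

-- ===== PORT A =====
-- the for-loop with early `return 0`: recursion over the sorted list carrying prev_dice
def csLoopA (is_large : Int) (prev_dice : Int) : List Int → Int
  | [] => if is_large == 1 then 20 else 15
  | dice :: rest => if dice == prev_dice + 1 then csLoopA is_large dice rest else 0

def count_straight_score (dices : List Int) (is_large : Int) : Int :=
  let sorted := PySem.List.sorted dices (fun x => x) false
  let prev_dice : Int := if is_large == 1 then 1 else 0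
  csLoopA is_large prev_dice sorted

-- ===== PORT B =====
def count_straight_score_alt (dices : List Int) (is_large : Int) : Int :=
  let start : Int := if is_large == 1 then 2 else 1
  let s : PySem.Set Int := PySem.Set.ofList dices
  if (PySem.List.pyRange 0 dices.length 1).all (fun i => PySem.Set.contains s (start + i)) then
    (if is_large == 1 then 20 else 15)
  else 0

-- ===== PRECONDITION & SPEC =====
def Spec_count_straight_score (dices : List Int) (is_large : Int) (out : Int) : Prop := out = count_straight_score_alt dices is_large
instance (dices : List Int) (is_large : Int) (out : Int) : Decidable (Spec_count_straight_score dices is_large out) := by unfold Spec_count_straight_score; infer_instance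

-- ===== CLAIM (what is proved, stated in full; the proofs are below) =====
def Claim_equal_count_straight_score : Prop := ∀ (dices : List Int) (is_large : Int), Dom_count_straight_score dices is_large → Spec_count_straight_score dices is_large (count_straight_score dices is_large)

-- ===== LEMMAS AND PROOFS =====

-- A's scan equals "list is exactly prev+1, prev+2, …" stated via pyRange
theorem csLoopA_eq_range (is_large : Int) (l : List Int) : ∀ (prev : Int),
    csLoopA is_large prev l =
      if l = PySem.List.pyRange (prev + 1) (prev + 1 + l.length) 1 then
        (if is_large == 1 then 20 else 15) else 0 := by
  induction l with
  | nil => intro prev; simp [csLoopA]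
  | cons d rest ih =>
    intro prev
    have hb : prev + 1 + ((d :: rest).length : Int) = prev + 1 + 1 + rest.length := by
      push_cast [List.length_cons]; ring
    have hcons : PySem.List.pyRange (prev + 1) (prev + 1 + (d :: rest).length) 1
        = (prev + 1) :: PySem.List.pyRange (prev + 1 + 1) (prev + 1 + 1 + rest.length) 1 := by
      rw [hb, PySem.List.pyRange_one_cons (by omega)]
    rw [hcons]
    by_cases hd : d = prev + 1
    · subst hd
      simp only [csLoopA, beq_self_eq_true, if_true, ih (prev + 1)]
      simp
    · simp only [csLoopA]
      rw [if_neg (by simpa using hd), if_neg (by simp [hd])]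

-- "sorted(dices) is exactly the run start..start+n-1" ↔ "every required pip is a member":
-- the n targets are distinct, so containing all of them forces the multisets equal.
theorem sorted_eq_range_iff_all_mem (dices : List Int) (start : Int) :
    (PySem.List.sorted dices (fun x => x) false
        = PySem.List.pyRange start (start + dices.length) 1)
    ↔ (∀ i ∈ PySem.List.pyRange 0 (dices.length : Int) 1, (start + i) ∈ dices) := by
  constructor
  · intro h i hi
    rw [PySem.List.mem_pyRange_one] at hi
    have : (start + i) ∈ PySem.List.pyRange start (start + dices.length) 1 := by
      rw [PySem.List.mem_pyRange_one]; omega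
    rw [← h, PySem.List.mem_sorted] at this
    exact this
  · intro h
    have hsub : PySem.List.pyRange start (start + dices.length) 1 ⊆ dices := by
      intro x hx
      rw [PySem.List.mem_pyRange_one] at hx
      have := h (x - start) (by rw [PySem.List.mem_pyRange_one]; omega)
      simpa using this
    have hlen : (PySem.List.pyRange start (start + dices.length) 1).length = dices.length := by
      rw [PySem.List.length_pyRange_one]; omega
    have hsp : List.Subperm (PySem.List.pyRange start (start + dices.length) 1) dices :=
      (PySem.List.nodup_pyRange_one start (start + dices.length)).subperm hsub
    have hperm : (PySem.List.pyRange start (start + dices.length) 1).Perm dices :=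
      hsp.perm_of_length_le (le_of_eq hlen.symm)
    exact PySem.List.sorted_id_eq_of_perm_of_pairwise _ _ hperm
      ((PySem.List.pairwise_lt_pyRange_one start (start + dices.length)).imp le_of_lt)

theorem count_straight_score_spec' (dices : List Int) (is_large : Int) :
    count_straight_score dices is_large = count_straight_score_alt dices is_large := by
  unfold count_straight_score count_straight_score_alt
  simp only []
  rw [csLoopA_eq_range]
  have hkey : ∀ start : Int,
      (PySem.List.sorted dices (fun x => x) false
          = PySem.List.pyRange start (start + (PySem.List.sorted dices (fun x => x) false).length) 1)
      ↔ ((PySem.List.pyRange 0 dices.length 1).all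
          (fun i => PySem.Set.contains (PySem.Set.ofList dices) (start + i)) = true) := by
    intro start
    rw [PySem.List.length_sorted]
    rw [sorted_eq_range_iff_all_mem dices start]
    simp [List.all_eq_true, PySem.Set.mem_ofList]
  by_cases h : is_large = 1
  · subst h
    have h2 : ((1:Int) + 1) = 2 := by norm_num
    simp only [beq_self_eq_true, if_true, h2]
    rw [if_congr (hkey 2) rfl rfl]
  · have h1 : ((0:Int) + 1) = 1 := by norm_num
    simp only [beq_iff_eq, if_neg h, h1]
    rw [if_congr (hkey 1) rfl rfl]

-- ===== VERDICT (by name: the statement is the Claim_ definition above) =====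
theorem count_straight_score_spec : Claim_equal_count_straight_score := by
  intro dices is_large _
  exact count_straight_score_spec' dices is_large
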